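-- pv_equiv track=rewrite | github.com/Valium-K/algorithm-study | dev.valium.algorithm/백준/기초/브루트 포스/1107.py | get_close_jari_nums
-- ===== SOURCE A (Python) =====
-- def circle_sub(num):
--     if num == 0:
--         return 9
--     else:
--         return num - 1
--
-- def circle_plus(num):
--     if num == 9:
--         return 0
--     else:
--         return num + 1
--
-- def get_close_jari_nums(num, missing_nums):
--     sliced_num = list(map(int, list(str(num))))
--
--     available_nums = []
--     for i in range(10):
--         if i not in missing_nums:
--             available_nums.append(i)
--
--     given_nums = []
--     for i in range(len(sliced_num)):
--         lower = -1
--         mid = -1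
--         higher = -1
--         for k in range(0, 10):
--             if circle_sub(sliced_num[i]) - k in available_nums:
--                 lower = circle_sub(sliced_num[i]) - k
--                 break
--
--         if sliced_num[i] in available_nums:
--             mid = sliced_num[i]
--
--         for k in range(0, 10):
--             if circle_plus(sliced_num[i]) + k in available_nums:
--                 higher = circle_plus(sliced_num[i]) + k
--                 break
--
--         given_nums.append(list(filter(lambda x: x != -1, [lower, mid, higher])))
--
--     return given_nums
-- ===== SOURCE B (Python) =====
-- def circle_sub(num):
--     if num == 0:
--         return 9
--     else:
--         return num - 1
--
-- def circle_plus(num):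
--     if num == 9:
--         return 0
--     else:
--         return num + 1
--
-- def get_close_jari_nums(num, missing_nums):
--     available = [i for i in range(10) if i not in missing_nums]
--
--     def entry(d):
--         lows = [a for a in available if a <= circle_sub(d)]
--         lower = max(lows) if lows else -1
--         mid = d if d in available else -1
--         highs = [a for a in available if a >= circle_plus(d)]
--         higher = min(highs) if highs else -1
--         return [x for x in [lower, mid, higher] if x != -1]
--
--     table = [entry(d) for d in range(10)]
--     return [table[d] for d in map(int, str(num))]
-- ===== Notes on version B (the rewrite author's own statement) =====
-- stated objective: simpler
-- what changed: B builds the set of available digits once, precomputes a 10-entry table whose entry for digit d holds [max available <= circle_sub(d), d if available, min available >= circle_plus(d)] filtered of -1, and maps the digits of str(num) through that table, replacing A's per-digit 10-step downward and upward membership scans.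
import Mathlib
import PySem

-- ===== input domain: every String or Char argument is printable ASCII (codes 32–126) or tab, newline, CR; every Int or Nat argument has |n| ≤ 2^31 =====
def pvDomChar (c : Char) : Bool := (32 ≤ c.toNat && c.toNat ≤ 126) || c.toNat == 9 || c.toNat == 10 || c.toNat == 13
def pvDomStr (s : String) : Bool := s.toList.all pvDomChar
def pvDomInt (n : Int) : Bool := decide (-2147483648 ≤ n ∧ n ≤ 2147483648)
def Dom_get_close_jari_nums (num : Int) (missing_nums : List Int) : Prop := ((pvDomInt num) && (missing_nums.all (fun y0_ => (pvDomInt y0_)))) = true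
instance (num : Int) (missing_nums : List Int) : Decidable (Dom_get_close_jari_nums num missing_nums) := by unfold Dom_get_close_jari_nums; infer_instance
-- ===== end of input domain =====

-- B replaces A's per-digit downward/upward 10-step scans by a 10-entry table built once
-- (lower = max available ≤ circle_sub d, higher = min available ≥ circle_plus d) and maps
-- the digits of str(num) through it; objective: simpler decomposition, same result.

-- shared module helpers (both Pythons define circle_sub / circle_plus)
def circle_sub (num : Int) : Int := if num = 0 then 9 else num - 1
def circle_plus (num : Int) : Int := if num = 9 then 0 else num + 1

-- int(c) for a one-character string; the `.getD 0` arm is Python's ValueError,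
-- unreachable under Pre_ (all characters of str(num) are digits when 0 ≤ num)
def pyDigitInt (c : Char) : Int := (PySem.Int.ofChars? [c]).getD 0

-- ===== PORT A =====
-- body of A's per-index loop: the two k-scans with break (find? = first match) and the mid test
def aEntry (available_nums : List Int) (d : Int) : List Int :=
  let lower := match (PySem.List.pyRange 0 10 1).find? (fun k => available_nums.contains (circle_sub d - k)) with
    | some k => circle_sub d - k
    | none => -1
  let mid := if available_nums.contains d then d else -1
  let higher := match (PySem.List.pyRange 0 10 1).find? (fun k => available_nums.contains (circle_plus d + k)) with
    | some k => circle_plus d + k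
    | none => -1
  [lower, mid, higher].filter (fun x => !(x == -1))

def get_close_jari_nums (num : Int) (missing_nums : List Int) : List (List Int) :=
  let sliced_num := (PySem.Int.toChars num).map pyDigitInt
  let available_nums := (PySem.List.pyRange 0 10 1).foldl
    (fun acc i => if missing_nums.contains i then acc else acc ++ [i]) []
  (PySem.List.pyRange 0 (sliced_num.length : Int) 1).foldl
    (fun acc i => acc ++ [aEntry available_nums (PySem.List.pyGetD sliced_num i 0)]) []

-- ===== PORT B =====
-- B's per-digit table entry: order statistics on the available list
def bEntry (available : List Int) (d : Int) : List Int :=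
  let lows := available.filter (fun a => a ≤ circle_sub d)
  let lower := PySem.List.maxD lows (fun x => x) (-1)
  let mid := if available.contains d then d else -1
  let highs := available.filter (fun a => circle_plus d ≤ a)
  let higher := PySem.List.minD highs (fun x => x) (-1)
  [lower, mid, higher].filter (fun x => !(x == -1))

def get_close_jari_nums_alt (num : Int) (missing_nums : List Int) : List (List Int) :=
  let available := (PySem.List.pyRange 0 10 1).filter (fun i => !(missing_nums.contains i))
  let table := (PySem.List.pyRange 0 10 1).map (bEntry available)
  (PySem.Int.toChars num).map (fun c => PySem.List.pyGetD table (pyDigitInt c) [])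

-- ===== PRECONDITION & SPEC =====
-- Pre_ excludes num < 0, on which Python A raises ValueError (int('-') on the sign character of str(num))
def Pre_get_close_jari_nums (num : Int) (missing_nums : List Int) : Prop := 0 ≤ num
instance (num : Int) (missing_nums : List Int) : Decidable (Pre_get_close_jari_nums num missing_nums) := by unfold Pre_get_close_jari_nums; infer_instance
def pvWitness_get_close_jari_nums : Int × List Int := (103, [0, 1, 5])

def Spec_get_close_jari_nums (num : Int) (missing_nums : List Int) (out : List (List Int)) : Prop := out = get_close_jari_nums_alt num missing_nums
instance (num : Int) (missing_nums : List Int) (out : List (List Int)) : Decidable (Spec_get_close_jari_nums num missing_nums out) := by unfold Spec_get_close_jari_nums; infer_instance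

-- ===== CLAIM (what is proved, stated in full; the proofs are below) =====
def Claim_equal_get_close_jari_nums : Prop := ∀ (num : Int) (missing_nums : List Int), Dom_get_close_jari_nums num missing_nums → Pre_get_close_jari_nums num missing_nums → Spec_get_close_jari_nums num missing_nums (get_close_jari_nums num missing_nums)

-- ===== LEMMAS AND PROOFS =====

-- every digit character parses to a value in [0, 9]
theorem pyDigitInt_digitChar (k : Nat) (hk : k < 10) :
    0 ≤ pyDigitInt (Nat.digitChar k) ∧ pyDigitInt (Nat.digitChar k) ≤ 9 := by
  interval_cases k <;> decide

theorem toDigitsCore_good (fuel n : Nat) (acc : List Char)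
    (hacc : ∀ c ∈ acc, 0 ≤ pyDigitInt c ∧ pyDigitInt c ≤ 9) :
    ∀ c ∈ Nat.toDigitsCore 10 fuel n acc, 0 ≤ pyDigitInt c ∧ pyDigitInt c ≤ 9 := by
  induction fuel generalizing n acc with
  | zero => simpa [Nat.toDigitsCore] using hacc
  | succ fuel ih =>
    rw [Nat.toDigitsCore]
    split
    · intro c hc
      rcases List.mem_cons.mp hc with h | h
      · subst h; exact pyDigitInt_digitChar _ (Nat.mod_lt _ (by norm_num))
      · exact hacc _ h
    · exact ih _ _ (by
        intro c hc
        rcases List.mem_cons.mp hc with h | h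
        · subst h; exact pyDigitInt_digitChar _ (Nat.mod_lt _ (by norm_num))
        · exact hacc _ h)

theorem toChars_digit_range (num : Int) (h : 0 ≤ num) :
    ∀ c ∈ PySem.Int.toChars num, 0 ≤ pyDigitInt c ∧ pyDigitInt c ≤ 9 := by
  unfold PySem.Int.toChars
  rw [if_neg (by omega)]
  exact toDigitsCore_good _ _ _ (by simp)

-- find? on a strictly increasing list returns k when p holds at k and at nothing before it
theorem find?_first {p : Int → Bool} {l : List Int} (hs : l.Pairwise (· < ·)) {k : Int}
    (hk : k ∈ l) (hpk : p k = true) (hbefore : ∀ j ∈ l, j < k → p j = false) :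
    l.find? p = some k := by
  induction l with
  | nil => cases hk
  | cons x t ih =>
    rcases List.mem_cons.mp hk with rfl | hkt
    · rw [List.find?_cons_of_pos hpk]
    · have hxk : x < k := (List.pairwise_cons.mp hs).1 _ hkt
      have hpx : p x = false := hbefore x List.mem_cons_self hxk
      rw [List.find?_cons_of_neg (by simp [hpx])]
      exact ih (List.pairwise_cons.mp hs).2 hkt
        (fun j hj hjk => hbefore j (List.mem_cons_of_mem _ hj) hjk)

-- A's downward scan from circle_sub d is the maximum available value ≤ circle_sub d
theorem lower_eq (avail : List Int) (hmem : ∀ a ∈ avail, 0 ≤ a ∧ a ≤ 9) (s : Int) (hs0 : 0 ≤ s) (hs9 : s ≤ 9) :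
    (match (PySem.List.pyRange 0 10 1).find? (fun k => avail.contains (s - k)) with
      | some k => s - k
      | none => (-1 : Int))
    = PySem.List.maxD (avail.filter (fun a => a ≤ s)) (fun x => x) (-1) := by
  by_cases hL : avail.filter (fun a => a ≤ s) = []
  · have h1 : (PySem.List.pyRange 0 10 1).find? (fun k => avail.contains (s - k)) = none := by
      rw [List.find?_eq_none]
      intro k hkmem hc
      have hmem' : (s - k) ∈ avail := by simpa using hc
      have hk0 : 0 ≤ k := (PySem.List.mem_pyRange_one.mp hkmem).1
      have : (s - k) ∈ avail.filter (fun a => a ≤ s) :=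
        List.mem_filter.mpr ⟨hmem', by simp; omega⟩
      rw [hL] at this
      cases this
    rw [h1, hL]
    simp [PySem.List.maxD, PySem.List.max?]
  · rcases hmax? : PySem.List.max? (avail.filter (fun a => a ≤ s)) (fun x => x) with _ | m
    · obtain ⟨x, t, hxt⟩ := List.exists_cons_of_ne_nil hL
      rw [hxt, PySem.List.max?_id_cons] at hmax?
      cases hmax?
    · have hmL : m ∈ avail.filter (fun a => a ≤ s) := PySem.List.max?_mem hmax?
      have hmax : ∀ y ∈ avail.filter (fun a => a ≤ s), y ≤ m :=
        fun y hy => PySem.List.max?_isMax hmax? y hy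
      have hmavail : m ∈ avail := (List.mem_filter.mp hmL).1
      have hms : m ≤ s := by have := (List.mem_filter.mp hmL).2; simpa using this
      have hm09 := hmem m hmavail
      have hfind : (PySem.List.pyRange 0 10 1).find? (fun k => avail.contains (s - k))
          = some (s - m) := by
        apply find?_first (PySem.List.pairwise_lt_pyRange_one 0 10)
        · exact PySem.List.mem_pyRange_one.mpr ⟨by omega, by omega⟩
        · show avail.contains (s - (s - m)) = true
          have h2 : s - (s - m) = m := by ring
          rw [h2]
          simpa using hmavail
        · intro j hjmem hjlt
          have hj0 : 0 ≤ j := (PySem.List.mem_pyRange_one.mp hjmem).1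
          by_contra hcon
          have hc : avail.contains (s - j) = true := by
            cases h : avail.contains (s - j)
            · exact absurd h hcon
            · rfl
          have hmem' : (s - j) ∈ avail := by simpa using hc
          have : (s - j) ∈ avail.filter (fun a => a ≤ s) :=
            List.mem_filter.mpr ⟨hmem', by simp; omega⟩
          have := hmax _ this
          omega
      rw [hfind]
      simp only [PySem.List.maxD, hmax?, Option.getD_some]
      show s - (s - m) = m
      omega

-- A's upward scan from circle_plus d is the minimum available value ≥ circle_plus d
theorem higher_eq (avail : List Int) (hmem : ∀ a ∈ avail, 0 ≤ a ∧ a ≤ 9) (t : Int) (ht0 : 0 ≤ t) (ht9 : t ≤ 9) :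
    (match (PySem.List.pyRange 0 10 1).find? (fun k => avail.contains (t + k)) with
      | some k => t + k
      | none => (-1 : Int))
    = PySem.List.minD (avail.filter (fun a => t ≤ a)) (fun x => x) (-1) := by
  by_cases hH : avail.filter (fun a => t ≤ a) = []
  · have h1 : (PySem.List.pyRange 0 10 1).find? (fun k => avail.contains (t + k)) = none := by
      rw [List.find?_eq_none]
      intro k hkmem hc
      have hmem' : (t + k) ∈ avail := by simpa using hc
      have hk0 : 0 ≤ k := (PySem.List.mem_pyRange_one.mp hkmem).1
      have : (t + k) ∈ avail.filter (fun a => t ≤ a) :=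
        List.mem_filter.mpr ⟨hmem', by simp; omega⟩
      rw [hH] at this
      cases this
    rw [h1, hH]
    simp [PySem.List.minD, PySem.List.min?]
  · rcases hmin? : PySem.List.min? (avail.filter (fun a => t ≤ a)) (fun x => x) with _ | m
    · obtain ⟨x, t', hxt⟩ := List.exists_cons_of_ne_nil hH
      rw [hxt, PySem.List.min?_id_cons] at hmin?
      cases hmin?
    · have hmH : m ∈ avail.filter (fun a => t ≤ a) := PySem.List.min?_mem hmin?
      have hmin : ∀ y ∈ avail.filter (fun a => t ≤ a), m ≤ y :=
        fun y hy => PySem.List.min?_isMin hmin? y hy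
      have hmavail : m ∈ avail := (List.mem_filter.mp hmH).1
      have hms : t ≤ m := by have := (List.mem_filter.mp hmH).2; simpa using this
      have hm09 := hmem m hmavail
      have hfind : (PySem.List.pyRange 0 10 1).find? (fun k => avail.contains (t + k))
          = some (m - t) := by
        apply find?_first (PySem.List.pairwise_lt_pyRange_one 0 10)
        · exact PySem.List.mem_pyRange_one.mpr ⟨by omega, by omega⟩
        · show avail.contains (t + (m - t)) = true
          have h2 : t + (m - t) = m := by ring
          rw [h2]
          simpa using hmavail
        · intro j hjmem hjlt
          have hj0 : 0 ≤ j := (PySem.List.mem_pyRange_one.mp hjmem).1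
          by_contra hcon
          have hc : avail.contains (t + j) = true := by
            cases h : avail.contains (t + j)
            · exact absurd h hcon
            · rfl
          have hmem' : (t + j) ∈ avail := by simpa using hc
          have : (t + j) ∈ avail.filter (fun a => t ≤ a) :=
            List.mem_filter.mpr ⟨hmem', by simp; omega⟩
          have := hmin _ this
          omega
      rw [hfind]
      simp only [PySem.List.minD, hmin?, Option.getD_some]
      show t + (m - t) = m
      omega

theorem entry_eq (avail : List Int) (hmem : ∀ a ∈ avail, 0 ≤ a ∧ a ≤ 9) (d : Int) (h0 : 0 ≤ d) (h9 : d ≤ 9) :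
    aEntry avail d = bEntry avail d := by
  have hs : 0 ≤ circle_sub d ∧ circle_sub d ≤ 9 := by unfold circle_sub; split <;> omega
  have ht : 0 ≤ circle_plus d ∧ circle_plus d ≤ 9 := by unfold circle_plus; split <;> omega
  simp only [aEntry, bEntry]
  rw [lower_eq avail hmem _ hs.1 hs.2, higher_eq avail hmem _ ht.1 ht.2]

-- ===== VERDICT (by name: the statement is the Claim_ definition above) =====
theorem get_close_jari_nums_spec : Claim_equal_get_close_jari_nums := by
  intro num missing_nums _ hpre
  unfold Spec_get_close_jari_nums get_close_jari_nums get_close_jari_nums_alt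
  have havail :
      (PySem.List.pyRange 0 10 1).foldl
        (fun acc i => if missing_nums.contains i then acc else acc ++ [i]) []
      = List.filter (fun i => !(missing_nums.contains i)) (PySem.List.pyRange 0 10 1) := by
    have hf : (fun (acc : List Int) (i : Int) => if missing_nums.contains i then acc else acc ++ [i])
        = (fun acc i => if (!(missing_nums.contains i)) = true then acc ++ [(fun x => x) i] else acc) := by
      funext acc i
      cases h : missing_nums.contains i <;> simp [h]
    rw [hf, PySem.List.foldl_append_if]
    simp
  rw [havail]
  set avail := List.filter (fun i => !(missing_nums.contains i)) (PySem.List.pyRange 0 10 1) with havail_def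
  have hmem : ∀ a ∈ avail, 0 ≤ a ∧ a ≤ 9 := by
    intro a ha
    have := (List.mem_filter.mp (havail_def ▸ ha)).1
    have := PySem.List.mem_pyRange_one.mp this
    omega
  show (PySem.List.pyRange 0 ((((PySem.Int.toChars num).map pyDigitInt).length : Int)) 1).foldl
      (fun acc i => acc ++ [aEntry avail (PySem.List.pyGetD ((PySem.Int.toChars num).map pyDigitInt) i 0)]) []
    = (PySem.Int.toChars num).map
        (fun c => PySem.List.pyGetD ((PySem.List.pyRange 0 10 1).map (bEntry avail)) (pyDigitInt c) [])
  rw [PySem.List.foldl_pyRange_zero_pyGetD' ((PySem.Int.toChars num).map pyDigitInt) 0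
      (fun acc d => acc ++ [aEntry avail d]) []]
  rw [PySem.List.foldl_append_singleton_eq_map]
  simp only [List.nil_append, List.map_map]
  apply List.map_congr_left
  intro ch hch
  obtain ⟨hd0, hd9⟩ := toChars_digit_range num hpre ch hch
  have hk : pyDigitInt ch = ((pyDigitInt ch).toNat : Int) := (Int.toNat_of_nonneg hd0).symm
  simp only [Function.comp]
  have hget : PySem.List.pyGetD ((PySem.List.pyRange 0 10 1).map (bEntry avail))
      (((pyDigitInt ch).toNat : Nat) : Int) [] = bEntry avail (((pyDigitInt ch).toNat : Nat) : Int) := by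
    have h := PySem.List.pyGetD_map_pyRange (bEntry avail) 10 (pyDigitInt ch).toNat [] (by omega)
    simpa using h
  rw [hk, hget, ← hk]
  exact entry_eq avail hmem (pyDigitInt ch) hd0 hd9
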